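-- pv_equiv track=rewrite | github.com/Gadzh1/test | reverse_reversed_sentence.py | rev_sen
-- ===== SOURCE A (Python) =====
-- def rev_sen(string):
--     res = string.split()
--     for i in range(len(res)):
--         res[i] = rev_word(res[i])
--
--     rev_string = ''
--     for i in range(len(res) - 1, -1, -1):
--         rev_string += res[i] + ' '
--
--     return rev_string
--
-- def rev_word(word):
--     res = ''
--
--     for i in range(len(word) - 1, -1, -1):
--         res += word[i]
--
--     return res
-- ===== SOURCE B (Python) =====
-- def rev_sen(string):
--     joined = ' '.join(string.split())
--     return joined[::-1] + ' ' if joined else ''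
-- ===== Notes on version B (the rewrite author's own statement) =====
-- stated objective: faster
-- what changed: B normalizes the input with str.split plus a single-space str.join and reverses the whole joined string with one slice (reversing each word and the word order at once), instead of A's per-word character-by-character reversal loop plus a second reverse-order string-accumulation loop.
import Mathlib
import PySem

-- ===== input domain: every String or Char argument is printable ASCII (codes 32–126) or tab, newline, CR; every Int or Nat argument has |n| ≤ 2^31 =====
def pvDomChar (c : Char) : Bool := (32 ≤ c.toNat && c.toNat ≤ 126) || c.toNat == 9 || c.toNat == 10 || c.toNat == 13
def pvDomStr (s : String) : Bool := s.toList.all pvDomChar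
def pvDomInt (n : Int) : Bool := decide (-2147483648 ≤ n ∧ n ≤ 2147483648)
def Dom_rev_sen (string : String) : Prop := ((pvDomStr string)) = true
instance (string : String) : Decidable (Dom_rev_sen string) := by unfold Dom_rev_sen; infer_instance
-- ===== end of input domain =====

-- B replaces A's per-word character-reversal loop + reverse-order accumulation loop by
-- reversing the whole space-normalized string in one pass (simpler).

-- ===== PORT A =====
-- rev_word: res = ''; for i in range(len(word)-1, -1, -1): res += word[i]; return res
def pvRevWord (word : List Char) : List Char :=
  (PySem.List.pyRange (PySem.List.len word - 1) (-1) (-1)).foldl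
    (fun res i => res ++ [PySem.List.pyGetD word i ' ']) []

def rev_sen (string : String) : String :=
  let res := (PySem.Chars.split₀ string.toList).map pvRevWord
  let revString := (PySem.List.pyRange (PySem.List.len res - 1) (-1) (-1)).foldl
    (fun acc i => acc ++ (PySem.List.pyGetD res i [] ++ [' '])) []
  String.ofList revString

-- ===== PORT B =====
-- joined = ' '.join(string.split()); return joined[::-1] + ' ' if joined else ''
-- (joined[::-1] is List.reverse, per PySem.List.slice?_none_none_neg_one; 'joined' inlined)
def rev_sen_alt (string : String) : String :=
  if (PySem.Chars.join [' '] (PySem.Chars.split₀ string.toList)).isEmpty then ""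
  else String.ofList ((PySem.Chars.join [' '] (PySem.Chars.split₀ string.toList)).reverse ++ [' '])

-- ===== PRECONDITION & SPEC =====
def Spec_rev_sen (string : String) (out : String) : Prop := out = rev_sen_alt string
instance (string : String) (out : String) : Decidable (Spec_rev_sen string out) := by unfold Spec_rev_sen; infer_instance

-- ===== CLAIM (what is proved, stated in full; the proofs are below) =====
def Claim_equal_rev_sen : Prop := ∀ (string : String), Dom_rev_sen string → Spec_rev_sen string (rev_sen string)

-- ===== LEMMAS AND PROOFS =====

-- A's rev_word loop is List.reverse
lemma pvRevWord_eq (word : List Char) : pvRevWord word = word.reverse := by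
  unfold pvRevWord
  rw [PySem.List.pyRange_neg_one_eq_reverse]
  have h1 : (-1 : Int) + 1 = 0 := by norm_num
  have h2 : PySem.List.len word - 1 + 1 = PySem.List.len word := by ring
  rw [h1, h2, PySem.List.foldl_append_singleton_eq_map]
  simp [pysem]

-- A's sentence loop flattens the reversed word list, each word followed by a space
lemma pvSenLoop_eq (res : List (List Char)) :
    (PySem.List.pyRange (PySem.List.len res - 1) (-1) (-1)).foldl
      (fun acc i => acc ++ (PySem.List.pyGetD res i [] ++ [' '])) [] =
    ((res.map (fun w => w ++ [' '])).reverse).flatten := by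
  rw [PySem.List.pyRange_neg_one_eq_reverse]
  have h1 : (-1 : Int) + 1 = 0 := by norm_num
  have h2 : PySem.List.len res - 1 + 1 = PySem.List.len res := by ring
  rw [h1, h2, PySem.List.foldl_append_eq_flatMap]
  have h3 : List.map (fun i => PySem.List.pyGetD res i [] ++ [' '])
      (PySem.List.pyRange 0 (res.length : Int)) =
      List.map (fun w => w ++ [' ']) res := by
    rw [show (fun i => PySem.List.pyGetD res i [] ++ [' ']) =
        (fun w => w ++ [' ']) ∘ (fun i => PySem.List.pyGetD res i []) from rfl,
      ← List.map_map, PySem.List.map_pyGetD_pyRange_zero']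
  simp only [List.nil_append, List.flatMap_def, List.map_reverse, PySem.List.len_eq]
  rw [h3]

-- split() never produces an empty word
lemma pvGo_ne_nil (s : List Char) : ∀ (cur : List Char) (acc : List (List Char)),
    (∀ w ∈ acc, w ≠ []) → ∀ w ∈ PySem.Chars.split₀.go s cur acc, w ≠ [] := by
  induction s with
  | nil =>
    intro cur acc h w hw
    by_cases hc : cur.isEmpty
    · simp [PySem.Chars.split₀.go, hc] at hw
      exact h w hw
    · simp [PySem.Chars.split₀.go, hc] at hw
      rcases hw with hw | hw
      · exact h w hw
      · subst hw; simpa [List.isEmpty_iff] using hc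
  | cons c rest ih =>
    intro cur acc h w hw
    by_cases hsp : PySem.Chars.isspace c
    · by_cases hc : cur.isEmpty
      · simp [PySem.Chars.split₀.go, hsp, hc] at hw
        exact ih [] acc h w hw
      · simp [PySem.Chars.split₀.go, hsp, hc] at hw
        refine ih [] (cur.reverse :: acc) ?_ w hw
        intro v hv
        rcases List.mem_cons.mp hv with hv | hv
        · subst hv; simpa [List.isEmpty_iff] using hc
        · exact h v hv

    · simp [PySem.Chars.split₀.go, hsp] at hw
      exact ih (c :: cur) acc h w hw

lemma pvSplit_ne_nil (cs : List Char) : ∀ w ∈ PySem.Chars.split₀ cs, w ≠ [] := by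
  intro w hw
  exact pvGo_ne_nil cs [] [] (by simp) w hw

-- join of nonempty words is nonempty
lemma pvJoin_ne_nil (w : List Char) (rest : List (List Char)) (hw : w ≠ []) :
    ¬ (PySem.Chars.join [' '] (w :: rest)).isEmpty := by
  cases rest with
  | nil => simpa [PySem.Chars.join_singleton, List.isEmpty_iff] using hw
  | cons w' rest' =>
    rw [PySem.Chars.join_cons_cons]
    simp [List.isEmpty_iff, hw]

-- the core identity: reversing each word and the word order = reversing the joined string
lemma pvMain (ws : List (List Char)) (h : ∀ w ∈ ws, w ≠ []) :
    ((ws.map (fun w => w.reverse ++ [' '])).reverse).flatten =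
    (if (PySem.Chars.join [' '] ws).isEmpty then ([] : List Char)
     else (PySem.Chars.join [' '] ws).reverse ++ [' ']) := by
  induction ws with
  | nil => simp [PySem.Chars.join_nil]
  | cons w rest ih =>
    have hw : w ≠ [] := h w (by simp)
    have hrest : ∀ v ∈ rest, v ≠ [] := fun v hv => h v (by simp [hv])
    cases rest with
    | nil =>
      simp [PySem.Chars.join_singleton, List.isEmpty_iff, hw]
    | cons w' rest' =>
      have hw' : w' ≠ [] := hrest w' (by simp)
      have hJ := pvJoin_ne_nil w' rest' hw'
      have hJ2 : ¬ (PySem.Chars.join [' '] (w :: w' :: rest')).isEmpty := pvJoin_ne_nil w _ hw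
      rw [PySem.Chars.join_cons_cons] at hJ2 ⊢
      have hIH := ih hrest
      rw [if_neg hJ] at hIH
      have hlhs : ((List.map (fun w => w.reverse ++ [' ']) (w :: w' :: rest')).reverse).flatten =
          ((List.map (fun w => w.reverse ++ [' ']) (w' :: rest')).reverse).flatten
            ++ (w.reverse ++ [' ']) := by
        simp
      rw [hlhs, hIH, if_neg hJ2]
      simp [List.reverse_append, List.append_assoc]

theorem pvRevSen_eq (s : String) :
    rev_sen s = String.ofList
      ((((PySem.Chars.split₀ s.toList).map (fun w => w.reverse ++ [' '])).reverse).flatten) := by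
  unfold rev_sen
  simp only [pvSenLoop_eq, List.map_map]
  have hmap : List.map ((fun w => w ++ [' ']) ∘ pvRevWord) (PySem.Chars.split₀ s.toList) =
      List.map (fun w => w.reverse ++ [' ']) (PySem.Chars.split₀ s.toList) :=
    List.map_congr_left (fun a _ => by simp [pvRevWord_eq])
  rw [hmap]

-- ===== VERDICT (by name: the statement is the Claim_ definition above) =====
theorem rev_sen_spec : Claim_equal_rev_sen := by
  intro s _
  unfold Spec_rev_sen
  rw [pvRevSen_eq, pvMain _ (pvSplit_ne_nil s.toList)]
  unfold rev_sen_alt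
  split_ifs with h
  · rfl
  · rfl
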